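-- pv_equiv track=rewrite | github.com/osomdev/pyshrimp | src/pyshrimp/_internal/wrapper/magicwrapper.py | _split_items_by
-- ===== SOURCE A (Python) =====
-- def _split_items_by(items, separator_element):
--     left = []
--     right = []
--     separator_found = False
--     for el in items:
--         if separator_found:
--             right.append(el)
--
--         elif el == separator_element:
--             separator_found = True
--
--         else:
--             left.append(el)
--
--     return left, right
-- ===== SOURCE B (Python) =====
-- def _split_items_by(items, separator_element):
--     items = list(items)
--     try:
--         i = items.index(separator_element)
--     except ValueError:
--         return items, []
--     return items[:i], items[i + 1:]
-- ===== Notes on version B (the rewrite author's own statement) =====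
-- stated objective: simpler
-- what changed: Locates the first separator with list.index and returns two slices, instead of threading a separator_found flag through an elementwise loop that appends item by item.
import Mathlib
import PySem

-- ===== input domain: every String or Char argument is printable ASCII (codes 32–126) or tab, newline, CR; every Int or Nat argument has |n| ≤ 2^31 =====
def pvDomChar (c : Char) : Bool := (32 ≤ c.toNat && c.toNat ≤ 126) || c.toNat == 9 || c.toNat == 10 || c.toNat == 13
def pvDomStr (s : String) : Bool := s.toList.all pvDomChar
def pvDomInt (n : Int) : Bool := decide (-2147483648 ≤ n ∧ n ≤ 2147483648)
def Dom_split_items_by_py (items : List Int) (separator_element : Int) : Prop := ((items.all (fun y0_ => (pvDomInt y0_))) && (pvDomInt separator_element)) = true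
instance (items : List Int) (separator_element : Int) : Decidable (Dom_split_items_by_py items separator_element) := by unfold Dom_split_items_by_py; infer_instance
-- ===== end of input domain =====

-- B replaces A's flag-threading elementwise loop by index-then-slice: same value, simpler decomposition.

-- ===== PORT A =====
-- the for-loop with state (left, right, separator_found)
def splitA_go (sep : Int) : List Int → List Int → List Int → Bool → List Int × List Int
  | [], left, right, _ => (left, right)
  | el :: rest, left, right, found =>
    if found then splitA_go sep rest left (right ++ [el]) found
    else if el == sep then splitA_go sep rest left right true
    else splitA_go sep rest (left ++ [el]) right found

def split_items_by_py (items : List Int) (separator_element : Int) : List Int × List Int :=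
  splitA_go separator_element items [] [] false

-- ===== PORT B =====
def split_items_by_py_alt (items : List Int) (separator_element : Int) : List Int × List Int :=
  match PySem.List.index? items separator_element with
  | none => (items, [])
  | some i => (PySem.List.slice items none (some (i : Int)),
               PySem.List.slice items (some ((i : Int) + 1)) none)

-- ===== PRECONDITION & SPEC =====
def Spec_split_items_by_py (items : List Int) (separator_element : Int) (out : List Int × List Int) : Prop := out = split_items_by_py_alt items separator_element
instance (items : List Int) (separator_element : Int) (out : List Int × List Int) : Decidable (Spec_split_items_by_py items separator_element out) := by unfold Spec_split_items_by_py; infer_instance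

-- ===== CLAIM (what is proved, stated in full; the proofs are below) =====
def Claim_equal_split_items_by_py : Prop := ∀ (items : List Int) (separator_element : Int), Dom_split_items_by_py items separator_element → Spec_split_items_by_py items separator_element (split_items_by_py items separator_element)

-- ===== LEMMAS AND PROOFS =====

theorem splitA_go_found (sep : Int) (xs left right : List Int) :
    splitA_go sep xs left right true = (left, right ++ xs) := by
  induction xs generalizing right with
  | nil => simp [splitA_go]
  | cons x t ih => simp [splitA_go, ih]

theorem splitA_go_main (sep : Int) (xs left : List Int) :
    splitA_go sep xs left [] false =
      match PySem.List.index? xs sep with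
      | none => (left ++ xs, [])
      | some i => (left ++ xs.take i, xs.drop (i + 1)) := by
  induction xs generalizing left with
  | nil => simp [splitA_go, PySem.List.index?]
  | cons x t ih =>
    by_cases hx : x = sep
    · subst hx
      rw [PySem.List.index?_cons_self]
      simp [splitA_go, splitA_go_found]
    · rw [PySem.List.index?_cons_of_ne t hx]
      simp only [splitA_go, Bool.false_eq_true, if_false, beq_iff_eq, hx, ih]
      cases PySem.List.index? t sep with
      | none => simp
      | some i => simp

theorem split_items_by_py_eq_alt (items : List Int) (sep : Int) :
    split_items_by_py items sep = split_items_by_py_alt items sep := by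
  unfold split_items_by_py split_items_by_py_alt
  rw [splitA_go_main]
  cases h : PySem.List.index? items sep with
  | none => simp
  | some i =>
    have h1 : PySem.List.slice items none (some (i : Int)) = items.take i :=
      PySem.List.slice_to_natCast items i
    have h2 : PySem.List.slice items (some ((i : Int) + 1)) none = items.drop (i + 1) := by
      have : ((i : Int) + 1) = ((i + 1 : Nat) : Int) := by push_cast; ring
      rw [this, PySem.List.slice_from_natCast]
    simp [h1, h2]

-- ===== VERDICT (by name: the statement is the Claim_ definition above) =====
theorem split_items_by_py_spec : Claim_equal_split_items_by_py := by
  intro items sep _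
  unfold Spec_split_items_by_py
  exact split_items_by_py_eq_alt items sep
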